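-- pv_equiv track=rewrite | github.com/Grayni/training_py | examples/jefersons_cylinder.py | jefferson_encryption
-- ===== SOURCE A (Python) =====
-- import math
--
-- n = 6
--
-- clear_alphabet = 'ABCDEFGHIJKLMNOPQRSTUVWXYZ'
--
-- def jefferson_encryption(text, discs, step, reverse=False):
--
--     new_str = ''.join(filter(lambda x: x in clear_alphabet, list(text.upper())))
--     value_blocks = math.ceil(len(new_str) / n)
--
--     ind = 1
--     en_str = ''
--
--     if reverse:
--         ind = -1
--
--     for i in range(value_blocks):
--         part_str = new_str[n*i:n*i+n]
--         for j in range(len(part_str)):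
--             en_str += discs[j][(discs[j].index(part_str[j]) + ind * step) % len(discs[0])]
--     return en_str
-- ===== SOURCE B (Python) =====
-- n = 6
--
-- clear_alphabet = 'ABCDEFGHIJKLMNOPQRSTUVWXYZ'
--
-- def jefferson_encryption(text, discs, step, reverse=False):
--     # Transpose strategy: split the filtered text column-wise (column j = the
--     # characters disc j will encrypt, i.e. filtered[j::n]), encrypt each column
--     # wholesale with its single disc, then interleave the encrypted columns
--     # back row by row.  No block slicing, no per-block inner loop.
--     filtered = [c for c in text.upper() if c in clear_alphabet]
--     L = len(discs[0]) if discs else 0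
--     shift = -step if reverse else step
--     cols = []
--     for j in range(min(n, len(filtered))):
--         d = discs[j]
--         cols.append([d[(d.index(c) + shift) % L] for c in filtered[j::n]])
--     rows = len(cols[0]) if cols else 0
--     out = []
--     for r in range(rows):
--         for col in cols:
--             if r < len(col):
--                 out.append(col[r])
--     return ''.join(out)
-- ===== Notes on version B (the rewrite author's own statement) =====
-- stated objective: alternative
-- what changed: B transposes the work: it splits the filtered text into 6 columns (column j = filtered[j::6], the characters disc j will encrypt), encrypts each column wholesale with its single disc, then interleaves the encrypted columns back row by row, instead of A's row-major walk over 6-character blocks with an inner per-position loop.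
import Mathlib
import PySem

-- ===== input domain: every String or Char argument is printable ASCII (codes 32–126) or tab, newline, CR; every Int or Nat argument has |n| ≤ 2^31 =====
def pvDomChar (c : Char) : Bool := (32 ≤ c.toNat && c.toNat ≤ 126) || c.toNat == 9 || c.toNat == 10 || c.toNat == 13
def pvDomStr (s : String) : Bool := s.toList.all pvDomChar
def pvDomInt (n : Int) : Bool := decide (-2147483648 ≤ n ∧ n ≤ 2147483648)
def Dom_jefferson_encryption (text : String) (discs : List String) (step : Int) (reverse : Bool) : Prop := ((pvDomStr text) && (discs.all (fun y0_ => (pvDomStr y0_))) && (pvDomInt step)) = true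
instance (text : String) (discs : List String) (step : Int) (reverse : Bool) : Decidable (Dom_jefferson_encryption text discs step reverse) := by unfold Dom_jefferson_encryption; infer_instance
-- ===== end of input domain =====

-- B encrypts by transposing: the filtered text is split into 6 columns (one per
-- disc), each column is encrypted wholesale with its single disc, and the
-- encrypted columns are interleaved back row by row (objective: alternative).

-- ===== PORT A =====
-- module constant: clear_alphabet (n = 6 is inlined as the literal 6)
def clearAlphabet : List Char := "ABCDEFGHIJKLMNOPQRSTUVWXYZ".toList

def jefferson_encryption (text : String) (discs : List String) (step : Int) (reverse : Bool) : String :=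
  let new_str : List Char := (PySem.Str.upper text).toList.filter (fun x => clearAlphabet.contains x)
  -- math.ceil(len(new_str) / 6) : exact as Nat ceiling division (the float is exact for these sizes)
  let value_blocks : Nat := (new_str.length + 5) / 6
  let ind : Int := if reverse then -1 else 1
  String.mk ((PySem.List.pyRange 0 (value_blocks : Int) 1).foldl (fun en_str i =>
    let part_str : List Char := PySem.List.slice new_str (some (6 * i)) (some (6 * i + 6))
    (PySem.List.pyRange 0 (part_str.length : Int) 1).foldl (fun en j =>
      let dj : List Char := (PySem.List.pyGetD discs j "").toList
      en ++ [PySem.List.pyGetD dj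
        (PySem.Int.mod ((((PySem.List.index? dj (PySem.List.pyGetD part_str j ' ')).getD 0 : Nat) : Int) + ind * step)
          (((PySem.List.pyGetD discs 0 "").toList.length : Nat) : Int)) ' ']) en_str) [])

-- ===== PORT B =====
-- hand port of the extended slice filtered[j::6] (start j ≥ 0 already dropped,
-- step 6): exact for a nonnegative start and the positive literal step 6
def jeffCol : List Char → List Char
  | [] => []
  | x :: xs => x :: jeffCol (xs.drop 5)
termination_by l => l.length
decreasing_by simp

def jefferson_encryption_alt (text : String) (discs : List String) (step : Int) (reverse : Bool) : String :=
  let filtered : List Char := (PySem.Str.upper text).toList.filter (fun c => clearAlphabet.contains c)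
  let L : Int := if discs.isEmpty then 0 else (((discs.getD 0 "").toList.length : Nat) : Int)
  let shift : Int := if reverse then -step else step
  let cols : List (List Char) :=
    (List.range (min 6 filtered.length)).map (fun j =>
      let d : List Char := (discs.getD j "").toList
      (jeffCol (filtered.drop j)).map (fun c =>
        PySem.List.pyGetD d (PySem.Int.mod ((((PySem.List.index? d c).getD 0 : Nat) : Int) + shift) L) ' '))
  let rows : Nat := (cols.getD 0 []).length
  String.mk ((List.range rows).foldl (fun out r =>
    cols.foldl (fun out col => if r < col.length then out ++ [col.getD r ' '] else out) out) [])

-- ===== PRECONDITION & SPEC =====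
-- Pre_ holds exactly where the Python A returns: every filtered character must occur
-- in its disc (else .index raises ValueError), the disc index must exist (IndexError),
-- and the rotated position must be inside that disc (IndexError on ragged discs);
-- an empty filtered text needs nothing.
def Pre_jefferson_encryption (text : String) (discs : List String) (step : Int) (reverse : Bool) : Prop :=
  ∀ p ∈ PySem.List.enumerate ((PySem.Str.upper text).toList.filter (fun c => clearAlphabet.contains c)) 0,
    p.1.toNat % 6 < discs.length ∧
    p.2 ∈ (discs.getD (p.1.toNat % 6) "").toList ∧
    (PySem.Int.mod ((((PySem.List.index? ((discs.getD (p.1.toNat % 6) "").toList) p.2).getD 0 : Nat) : Int)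
        + (if reverse then -step else step))
      (((discs.getD 0 "").toList.length : Nat) : Int)).toNat
      < (discs.getD (p.1.toNat % 6) "").toList.length

instance (text : String) (discs : List String) (step : Int) (reverse : Bool) : Decidable (Pre_jefferson_encryption text discs step reverse) := by unfold Pre_jefferson_encryption; infer_instance

def pvWitness_jefferson_encryption : String × List String × Int × Bool := ("AB", ["ABC", "BCA"], 1, false)

def Spec_jefferson_encryption (text : String) (discs : List String) (step : Int) (reverse : Bool) (out : String) : Prop := out = jefferson_encryption_alt text discs step reverse
instance (text : String) (discs : List String) (step : Int) (reverse : Bool) (out : String) : Decidable (Spec_jefferson_encryption text discs step reverse out) := by unfold Spec_jefferson_encryption; infer_instance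

-- ===== CLAIM (what is proved, stated in full; the proofs are below) =====
def Claim_equal_jefferson_encryption : Prop := ∀ (text : String) (discs : List String) (step : Int) (reverse : Bool), Dom_jefferson_encryption text discs step reverse → Pre_jefferson_encryption text discs step reverse → Spec_jefferson_encryption text discs step reverse (jefferson_encryption text discs step reverse)

-- ===== LEMMAS AND PROOFS =====

-- the character both programs emit for index class j (= i % 6) and character c
def encChar (discs : List String) (shift L : Int) (j : Nat) (c : Char) : Char :=
  PySem.List.pyGetD ((discs.getD j "").toList)
    (PySem.Int.mod ((((PySem.List.index? ((discs.getD j "").toList) c).getD 0 : Nat) : Int) + shift) L) ' '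

-- the common flat shape: apply f to every character with its flat position
def specFlat (f : Nat → Char → Char) : Nat → List Char → List Char
  | _, [] => []
  | o, c :: cs => f o c :: specFlat f (o + 1) cs

lemma specFlat_eq_of (f g : Nat → Char → Char) :
    ∀ (l : List Char) (o₁ o₂ : Nat), (∀ k c, k < l.length → f (o₁ + k) c = g (o₂ + k) c) →
      specFlat f o₁ l = specFlat g o₂ l := by
  intro l
  induction l with
  | nil => intro _ _ _; rfl
  | cons x xs ih =>
    intro o₁ o₂ h
    simp only [specFlat]
    refine congrArg₂ _ ?_ (ih (o₁ + 1) (o₂ + 1) ?_)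
    · have := h 0 x (by simp)
      simpa using this
    · intro k c hk
      have := h (k + 1) c (by simpa using Nat.succ_lt_succ hk)
      simpa [Nat.add_assoc, Nat.add_comm, Nat.add_left_comm] using this

lemma specFlat_append (f : Nat → Char → Char) :
    ∀ (a b : List Char) (o : Nat),
      specFlat f o (a ++ b) = specFlat f o a ++ specFlat f (o + a.length) b := by
  intro a
  induction a with
  | nil => intro b o; simp [specFlat]
  | cons x xs ih =>
    intro b o
    simp only [List.cons_append, specFlat, ih, List.length_cons]
    have : o + 1 + xs.length = o + (xs.length + 1) := by omega
    rw [this]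

lemma rangeMapOff (f : Nat → Char → Char) :
    ∀ (l : List Char) (o : Nat),
      (List.range l.length).map (fun k => f (o + k) (l.getD k ' ')) = specFlat f o l := by
  intro l
  induction l with
  | nil => intro o; simp [specFlat]
  | cons x xs ih =>
    intro o
    rw [List.length_cons, List.range_succ_eq_map]
    simp only [List.map_cons, List.map_map, Nat.add_zero, List.getD_cons_zero, specFlat]
    refine congrArg _ ?_
    have : ((fun k => f (o + k) ((x :: xs).getD k ' ')) ∘ Nat.succ)
        = fun k => f ((o + 1) + k) (xs.getD k ' ') := by
      funext k
      have : o + (k + 1) = o + 1 + k := by omega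
      simp [Function.comp, Nat.succ_eq_add_one, this]
    rw [this, ih]

lemma rangeMap (f : Nat → Char → Char) (l : List Char) :
    (List.range l.length).map (fun k => f k (l.getD k ' ')) = specFlat f 0 l := by
  have := rangeMapOff f l 0
  simpa using this

lemma chunk_flat (f : Nat → Char → Char) :
    ∀ (N : Nat) (l : List Char), l.length ≤ 6 * N →
      (List.range ((l.length + 5) / 6)).flatMap (fun i => specFlat f 0 ((l.drop (6 * i)).take 6))
        = specFlat (fun i c => f (i % 6) c) 0 l := by
  intro N
  induction N with
  | zero =>
    intro l hl
    have : l = [] := List.eq_nil_of_length_eq_zero (by omega)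
    subst this
    simp [specFlat]
  | succ N ih =>
    intro l hl
    rcases Nat.eq_zero_or_pos l.length with h0 | hpos
    · have : l = [] := List.eq_nil_of_length_eq_zero h0
      subst this
      simp [specFlat]
    · have hvb : (l.length + 5) / 6 = ((l.drop 6).length + 5) / 6 + 1 := by
        rw [List.length_drop]; omega
      rw [hvb, List.range_succ_eq_map, List.flatMap_cons, List.flatMap_map]
      have htail : (List.range (((l.drop 6).length + 5) / 6)).flatMap
            (fun a => specFlat f 0 ((l.drop (6 * a.succ)).take 6))
          = (List.range (((l.drop 6).length + 5) / 6)).flatMap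
            (fun i => specFlat f 0 (((l.drop 6).drop (6 * i)).take 6)) := by
        refine List.flatMap_congr ?_
        intro i _
        rw [List.drop_drop]
        have : 6 * i.succ = 6 * i + 6 := by omega
        rw [this, Nat.add_comm (6*i) 6]
      rw [htail, ih (l.drop 6) (by rw [List.length_drop]; omega)]
      have hsplit : l = l.take 6 ++ l.drop 6 := (List.take_append_drop 6 l).symm
      conv_rhs => rw [hsplit]
      rw [specFlat_append]
      simp only [Nat.mul_zero, List.drop_zero, Nat.zero_add]
      refine congrArg₂ _ ?_ ?_
      · refine specFlat_eq_of _ _ _ 0 0 ?_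
        intro k c hk
        have hk6 : k < 6 := lt_of_lt_of_le hk (by simpa using List.length_take_le 6 l)
        simp [Nat.mod_eq_of_lt hk6]
      · rcases le_or_gt 6 l.length with h6 | h6
        · have hlen : (l.take 6).length = 6 := by simp [List.length_take]; omega
          rw [hlen]
          refine specFlat_eq_of _ _ _ 0 6 ?_
          intro k c _
          simp [Nat.add_comm 6 k, Nat.add_mod_right]
        · have : l.drop 6 = [] := List.drop_eq_nil_of_le (by omega)
          rw [this]
          rfl

lemma A_eq (text : String) (discs : List String) (step : Int) (reverse : Bool) :
    jefferson_encryption text discs step reverse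
      = String.mk (specFlat
          (fun i c => encChar discs (if reverse then -step else step)
            (((discs.getD 0 "").toList.length : Nat) : Int) (i % 6) c) 0
          ((PySem.Str.upper text).toList.filter (fun c => clearAlphabet.contains c))) := by
  set l := (PySem.Str.upper text).toList.filter (fun c => clearAlphabet.contains c) with hl
  set shift : Int := if reverse then -step else step with hshift
  set L : Int := (((discs.getD 0 "").toList.length : Nat) : Int) with hL
  show String.mk _ = _
  refine congrArg _ ?_
  simp only [PySem.List.foldl_append_singleton_eq_map, PySem.List.foldl_append_eq_flatMap,
    List.nil_append]
  rw [PySem.List.pyRange_one 0 ((l.length + 5) / 6 : Nat)]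
  simp only [Int.sub_zero, Int.toNat_natCast, List.flatMap_map, Int.zero_add]
  have hind : (if reverse then (-1 : Int) else 1) * step = shift := by
    cases reverse <;> simp [hshift]
  have hbody : ∀ k : Nat,
      (PySem.List.pyRange 0 ((PySem.List.slice l (some (6 * (k : Int))) (some (6 * (k : Int) + 6))).length : Int) 1).map
        (fun j =>
          PySem.List.pyGetD ((PySem.List.pyGetD discs j "").toList)
            (PySem.Int.mod ((((PySem.List.index? ((PySem.List.pyGetD discs j "").toList)
                (PySem.List.pyGetD (PySem.List.slice l (some (6 * (k : Int))) (some (6 * (k : Int) + 6))) j ' ')).getD 0 : Nat) : Int)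
              + (if reverse then (-1 : Int) else 1) * step)
              (((PySem.List.pyGetD discs 0 "").toList.length : Nat) : Int)) ' ')
      = specFlat (fun j c => encChar discs shift L j c) 0 ((l.drop (6 * k)).take 6) := by
    intro k
    have hslice : PySem.List.slice l (some (6 * (k : Int))) (some (6 * (k : Int) + 6))
        = (l.drop (6 * k)).take 6 := by
      have h1 : (6 * (k : Int)) = ((6 * k : Nat) : Int) := by push_cast; ring
      have h2 : (6 * (k : Int) + 6) = ((6 * k + 6 : Nat) : Int) := by push_cast; ring
      rw [h2, h1, PySem.List.slice_natCast]
      congr 1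
      omega
    rw [hslice, hind]
    rw [PySem.List.pyRange_one 0 _]
    simp only [Int.sub_zero, Int.toNat_natCast, List.map_map, Int.zero_add]
    rw [← rangeMap (fun j c => encChar discs shift L j c) ((l.drop (6 * k)).take 6)]
    refine List.map_congr_left ?_
    intro j hj
    simp only [Function.comp, PySem.List.pyGetD_natCast, PySem.List.pyGetD_zero, encChar, ← hL]
  calc (List.range ((l.length + 5) / 6)).flatMap _
      = (List.range ((l.length + 5) / 6)).flatMap
          (fun k => specFlat (fun j c => encChar discs shift L j c) 0 ((l.drop (6 * k)).take 6)) := by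
        refine List.flatMap_congr ?_
        intro k _
        exact hbody k
    _ = _ := chunk_flat _ ((l.length + 5) / 6) l (by omega)

-- B-side lemmas: jeffCol indexing/length, the interleave identity

lemma jeffCol_cons (x : Char) (xs : List Char) :
    jeffCol (x :: xs) = x :: jeffCol ((x :: xs).drop 6) := by
  conv_lhs => rw [jeffCol.eq_def]
  simp

lemma jeffCol_getElem? : ∀ (l : List Char) (r : Nat), (jeffCol l)[r]? = l[6 * r]? := by
  intro l
  induction l using jeffCol.induct with
  | case1 => intro r; simp [jeffCol]
  | case2 x xs ih =>
    intro r
    cases r with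
    | zero => simp [jeffCol]
    | succ r =>
      rw [jeffCol_cons, List.getElem?_cons_succ, show (x :: xs).drop 6 = xs.drop 5 from rfl,
        ih r, List.getElem?_drop, show 6 * (r + 1) = 5 + 6 * r + 1 from by omega,
        List.getElem?_cons_succ]

-- the inner row loop: collect col[r] from each column that is long enough
lemma row_foldl (r : Nat) :
    ∀ (cols : List (List Char)) (acc : List Char),
      cols.foldl (fun out col => if r < col.length then out ++ [col.getD r ' '] else out) acc
        = acc ++ cols.filterMap (fun col => col[r]?) := by
  intro cols
  induction cols with
  | nil => intro acc; simp
  | cons c cs ih =>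
    intro acc
    simp only [List.foldl_cons, List.filterMap_cons]
    by_cases h : r < c.length
    · rw [if_pos h, ih, List.getD_eq_getElem c ' ' h]
      simp [List.getElem?_eq_getElem h]
    · rw [if_neg h, ih]
      rw [List.getElem?_eq_none (by omega)]

lemma filterMap_range_eq_map (m : Nat) (F : Nat → Option Char) (h : Nat → Char)
    (hh : ∀ j, j < m → F j = some (h j)) :
    (List.range m).filterMap F = (List.range m).map h := by
  induction m with
  | zero => simp
  | succ m ih =>
    rw [List.range_succ, List.filterMap_append, List.map_append,
      ih (fun j hj => hh j (by omega))]
    simp [hh m (by omega)]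

lemma filterMap_range_shrink (m m' : Nat) (F : Nat → Option Char) (hm : m' ≤ m)
    (hnone : ∀ j, m' ≤ j → j < m → F j = none) :
    (List.range m).filterMap F = (List.range m').filterMap F := by
  obtain ⟨k, rfl⟩ := Nat.exists_eq_add_of_le hm
  induction k with
  | zero => rfl
  | succ k ih =>
    have : m' + (k + 1) = (m' + k) + 1 := by omega
    rw [this, List.range_succ, List.filterMap_append]
    have h1 : F (m' + k) = none := hnone _ (by omega) (by omega)
    simp only [List.filterMap_cons, h1, List.filterMap_nil, List.append_nil]
    exact ih (by omega) (fun j hj1 hj2 => hnone j hj1 (by omega))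

-- the transpose/interleave identity: reading the encrypted columns row by row
-- gives the flat left-to-right encryption
lemma interleave (g : Nat → Char → Char) :
    ∀ (N : Nat) (l : List Char), l.length ≤ 6 * N →
      (List.range ((jeffCol l).length)).flatMap
        (fun r => (List.range (min 6 l.length)).filterMap
          (fun j => ((jeffCol (l.drop j)).map (g j))[r]?))
        = specFlat (fun i c => g (i % 6) c) 0 l := by
  intro N
  induction N with
  | zero =>
    intro l hl
    have : l = [] := List.eq_nil_of_length_eq_zero (by omega)
    subst this
    simp [jeffCol, specFlat]
  | succ N ih =>
    intro l hl
    rcases Nat.eq_zero_or_pos l.length with h0 | hpos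
    · have : l = [] := List.eq_nil_of_length_eq_zero h0
      subst this
      simp [jeffCol, specFlat]
    · have hne : l ≠ [] := by intro h; rw [h] at hpos; simp at hpos
      obtain ⟨x, xs, rfl⟩ := List.exists_cons_of_ne_nil hne
      set l := x :: xs with hldef
      have hKs : (jeffCol l).length = (jeffCol (l.drop 6)).length + 1 := by
        rw [jeffCol_cons]
        simp only [List.length_cons, hldef]
      rw [hKs, List.range_succ_eq_map, List.flatMap_cons, List.flatMap_map]
      have hentry : ∀ (r j : Nat),
          ((jeffCol (l.drop j)).map (g j))[r]? = (l[j + 6 * r]?).map (g j) := by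
        intro r j
        rw [List.getElem?_map, jeffCol_getElem?, List.getElem?_drop]
      -- row 0 is the first chunk
      have hrow0 : (List.range (min 6 l.length)).filterMap
            (fun j => ((jeffCol (l.drop j)).map (g j))[0]?)
          = specFlat (fun i c => g (i % 6) c) 0 (l.take 6) := by
        have hlen : (l.take 6).length = min 6 l.length := by
          simp [List.length_take]
        rw [filterMap_range_eq_map _ _ (fun j => g (j % 6) ((l.take 6).getD j ' '))
          (fun j hj => by
            dsimp only
            have hj6 : j < 6 := lt_of_lt_of_le hj (Nat.min_le_left _ _)
            have hjlen : j < l.length := lt_of_lt_of_le hj (Nat.min_le_right _ _)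
            rw [hentry 0 j, show j + 6 * 0 = j from by omega,
              List.getElem?_eq_getElem hjlen]
            have hjt : j < (l.take 6).length := by rw [hlen]; omega
            rw [List.getD_eq_getElem _ _ hjt, List.getElem_take,
              Nat.mod_eq_of_lt hj6]
            rfl)]
        rw [← hlen, rangeMap (fun i c => g (i % 6) c) (l.take 6)]
      -- later rows are the rows of the tail
      have htail : (List.range ((jeffCol (l.drop 6)).length)).flatMap
            (fun r => (List.range (min 6 l.length)).filterMap
              (fun j => ((jeffCol (l.drop j)).map (g j))[r.succ]?))
          = (List.range ((jeffCol (l.drop 6)).length)).flatMap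
            (fun r => (List.range (min 6 (l.drop 6).length)).filterMap
              (fun j => ((jeffCol ((l.drop 6).drop j)).map (g j))[r]?)) := by
        refine List.flatMap_congr ?_
        intro r _
        rw [filterMap_range_shrink (min 6 l.length) (min 6 (l.drop 6).length)
          (fun j => ((jeffCol (l.drop j)).map (g j))[r.succ]?)
          (by simp only [List.length_drop]; omega)
          (fun j hj1 hj2 => by
            dsimp only
            rw [hentry r.succ j]
            have hout : l.length ≤ j + 6 * r.succ := by
              simp only [List.length_drop] at hj1
              omega
            rw [List.getElem?_eq_none hout]
            rfl)]
        refine List.filterMap_congr ?_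
        intro j _
        dsimp only
        rw [hentry r.succ j, List.getElem?_map, jeffCol_getElem?, List.getElem?_drop,
          List.getElem?_drop, show 6 + (j + 6 * r) = j + 6 * r.succ from by omega]
      rw [hrow0, htail, ih (l.drop 6) (by simp only [List.length_drop]; omega)]
      -- combine the chunk and the tail
      have hsplit : l = l.take 6 ++ l.drop 6 := (List.take_append_drop 6 l).symm
      conv_rhs => rw [hsplit]
      rw [specFlat_append]
      refine congrArg₂ _ rfl ?_
      rcases le_or_gt 6 l.length with h6 | h6
      · have hlen6 : (l.take 6).length = 6 := by simp [List.length_take]; omega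
        rw [hlen6]
        refine specFlat_eq_of _ _ _ 0 (0 + 6) ?_
        intro k c _
        simp [Nat.add_mod_left]
      · have hnil : l.drop 6 = [] := List.drop_eq_nil_of_le (by omega)
        rw [hnil]
        rfl

set_option maxHeartbeats 1000000 in
lemma B_eq (text : String) (discs : List String) (step : Int) (reverse : Bool) :
    jefferson_encryption_alt text discs step reverse
      = String.mk (specFlat
          (fun i c => encChar discs (if reverse then -step else step)
            (((discs.getD 0 "").toList.length : Nat) : Int) (i % 6) c) 0
          ((PySem.Str.upper text).toList.filter (fun c => clearAlphabet.contains c))) := by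
  unfold jefferson_encryption_alt
  dsimp only
  set l := (PySem.Str.upper text).toList.filter (fun c => clearAlphabet.contains c) with hl
  set shift : Int := if reverse then -step else step with hshift
  set L : Int := (((discs.getD 0 "").toList.length : Nat) : Int) with hL
  refine congrArg _ ?_
  -- Python's `len(discs[0]) if discs else 0` equals len(discs.getD 0 "") always
  have hLif : (if discs.isEmpty then (0 : Int) else L) = L := by
    cases discs <;> simp [hL]
  rw [hLif]
  simp only [row_foldl, PySem.List.foldl_append_eq_flatMap, List.nil_append]
  have hfold : (List.range (min 6 l.length)).map
      (fun j => (jeffCol (l.drop j)).map (fun c =>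
        PySem.List.pyGetD ((discs.getD j "").toList)
          (PySem.Int.mod ((((PySem.List.index? ((discs.getD j "").toList) c).getD 0 : Nat) : Int) + shift) L) ' '))
    = (List.range (min 6 l.length)).map
        (fun j => (jeffCol (l.drop j)).map (fun c => encChar discs shift L j c)) := rfl
  rw [hfold]
  set cols : List (List Char) := (List.range (min 6 l.length)).map (fun j =>
    (jeffCol (l.drop j)).map (fun c => encChar discs shift L j c)) with hcols
  have hrows : (cols.getD 0 []).length = (jeffCol l).length := by
    rcases Nat.eq_zero_or_pos l.length with h0 | hpos
    · have hnil : l = [] := List.eq_nil_of_length_eq_zero h0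
      simp [hcols, hnil, jeffCol]
    · have hm : 0 < min 6 l.length := by omega
      rw [hcols, List.getD_eq_getElem _ _ (by simpa using hm)]
      simp
  rw [hrows]
  calc (List.range ((jeffCol l).length)).flatMap (fun r => cols.filterMap (fun col => col[r]?))
      = (List.range ((jeffCol l).length)).flatMap
          (fun r => (List.range (min 6 l.length)).filterMap
            (fun j => ((jeffCol (l.drop j)).map (fun c => encChar discs shift L j c))[r]?)) := by
        refine List.flatMap_congr ?_
        intro r _
        rw [hcols, List.filterMap_map]
        rfl
    _ = _ := interleave (fun j c => encChar discs shift L j c) l.length l (by omega)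

-- ===== VERDICT (by name: the statement is the Claim_ definition above) =====
theorem jefferson_encryption_spec : Claim_equal_jefferson_encryption := by
  intro text discs step reverse hDom hPre
  unfold Spec_jefferson_encryption
  rw [A_eq, B_eq]
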